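-- pv_equiv track=rewrite | github.com/mthjwu/ask | ask/grange.py | range_intersect_2list
-- ===== SOURCE A (Python) =====
-- def range_intersect_2list(a, b):
--     """
--     get intersections between two list of ranges
--     range in format of [0, 10] refers to range(0, 10)
--     """
--     ranges = []
--     i = j = 0
--     while i < len(a) and j < len(b):
--         a_left, a_right = a[i]
--         b_left, b_right = b[j]
--
--         if a_right < b_right:
--             i += 1
--         else:
--             j += 1
--
--         if a_right >= b_left and b_right >= a_left:
--             end_pts = sorted([a_left, a_right, b_left, b_right])
--             middle = [end_pts[1], end_pts[2]]
--             ranges.append(middle)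
--
--     ri = 0
--     while ri < len(ranges)-1:
--         if ranges[ri][1] == ranges[ri+1][0]:
--             ranges[ri:ri+2] = [[ranges[ri][0], ranges[ri+1][1]]]
--
--         ri += 1
--
--     return ranges
-- ===== SOURCE B (Python) =====
-- def range_intersect_2list(a, b):
--     """
--     get intersections between two list of ranges
--     range in format of [0, 10] refers to range(0, 10)
--     """
--     out = []
--     while a and b:
--         (a_left, a_right), (b_left, b_right) = a[0], b[0]
--         if a_right >= b_left and b_right >= a_left:
--             # middle two of the four endpoints: max of the pair minima, min of the pair maxima
--             lo = max(min(a_left, a_right), min(b_left, b_right))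
--             hi = min(max(a_left, a_right), max(b_left, b_right))
--             out.append([lo, hi])
--         if a_right < b_right:
--             a = a[1:]
--         else:
--             b = b[1:]
--     res = []
--     while out:
--         if len(out) >= 2 and out[0][1] == out[1][0]:
--             res.append([out[0][0], out[1][1]])
--             out = out[2:]
--         else:
--             res.append(out[0])
--             out = out[1:]
--     return res
-- ===== Notes on version B (the rewrite author's own statement) =====
-- stated objective: alternative
-- what changed: B consumes the two lists from the front instead of walking them with indices, computes the middle two endpoints by min/max arithmetic instead of sorting the four endpoints at every overlap, and rebuilds the coalescing as a forward two-at-a-time pass producing a fresh list instead of repeated in-place slice assignments.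
-- outside the precondition, e.g. on range_intersect_2list([[0, 5]], [[6, 7], [1, 2, 3]]): A returns [], B returns []
import Mathlib
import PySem

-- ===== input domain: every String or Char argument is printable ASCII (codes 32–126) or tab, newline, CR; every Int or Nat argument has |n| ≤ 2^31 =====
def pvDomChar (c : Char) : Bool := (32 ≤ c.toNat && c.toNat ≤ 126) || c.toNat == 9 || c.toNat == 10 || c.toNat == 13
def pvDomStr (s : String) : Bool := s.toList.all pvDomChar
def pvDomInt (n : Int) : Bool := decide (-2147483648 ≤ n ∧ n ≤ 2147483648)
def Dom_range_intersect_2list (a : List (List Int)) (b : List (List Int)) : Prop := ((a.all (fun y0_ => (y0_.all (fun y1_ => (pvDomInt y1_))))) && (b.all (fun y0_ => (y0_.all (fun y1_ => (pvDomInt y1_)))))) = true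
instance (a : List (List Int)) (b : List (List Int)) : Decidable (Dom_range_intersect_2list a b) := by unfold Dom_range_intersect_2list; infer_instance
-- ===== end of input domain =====

-- B replaces A's index-based two-pointer walk (which sorts the four endpoints at every
-- overlap) by a list-consuming loop computing the middle two endpoints by min/max
-- arithmetic, and rebuilds A's in-place splice coalescing as a forward two-at-a-time pass.

-- ===== PORT A =====

-- sorted([a_left, a_right, b_left, b_right]); middle = [end_pts[1], end_pts[2]]
-- (the two indices are always in range: the sorted list has four elements, so getD's
-- default is never used)
def pvMidA (al ar bl br : Int) : List Int :=
  let s := PySem.List.sorted [al, ar, bl, br] (fun x => x) false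
  [(PySem.List.pyGet? s 1).getD 0, (PySem.List.pyGet? s 2).getD 0]

-- the `while i < len(a) and j < len(b)` loop of A, state (i, j, ranges)
def pvLoopA (a b : List (List Int)) (i j : Nat) (ranges : List (List Int)) : List (List Int) :=
  if _h : i < a.length ∧ j < b.length then
    -- `a_left, a_right = a[i]` / `b_left, b_right = b[j]`: unpacking raises unless the
    -- element is a two-element list; Pre_ excludes malformed elements (fallback unreached)
    match (PySem.List.pyGet? a (i : Int)).getD [], (PySem.List.pyGet? b (j : Int)).getD [] with
    | [al, ar], [bl, br] =>
      let ranges' := if ar ≥ bl ∧ br ≥ al then ranges ++ [pvMidA al ar bl br] else ranges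
      if ar < br then pvLoopA a b (i + 1) j ranges'
      else pvLoopA a b i (j + 1) ranges'
    | _, _ => ranges
  else ranges
termination_by (a.length - i) + (b.length - j)
decreasing_by all_goals omega

-- the coalescing loop: `ranges[ri:ri+2] = [[ranges[ri][0], ranges[ri+1][1]]]`, `ri += 1`
-- (inner indices 0/1 are always in range on reached inputs: elements are the 2-lists
-- built by pvMidA, so getD's default is never used)
def pvCoalA (l : List (List Int)) (ri : Nat) : List (List Int) :=
  if _h : (ri : Int) < (l.length : Int) - 1 then
    if (PySem.List.pyGet? ((PySem.List.pyGet? l (ri : Int)).getD []) 1).getD 0 =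
        (PySem.List.pyGet? ((PySem.List.pyGet? l ((ri : Int) + 1)).getD []) 0).getD 0 then
      pvCoalA
        (l.take ri ++
          [[(PySem.List.pyGet? ((PySem.List.pyGet? l (ri : Int)).getD []) 0).getD 0,
            (PySem.List.pyGet? ((PySem.List.pyGet? l ((ri : Int) + 1)).getD []) 1).getD 0]] ++
          l.drop (ri + 2)) (ri + 1)
    else
      pvCoalA l (ri + 1)
  else l
termination_by l.length - ri
decreasing_by all_goals (first
  | (simp only [List.length_append, List.length_take, List.length_drop,
      List.length_cons, List.length_nil]; omega)
  | omega)

def range_intersect_2list (a : List (List Int)) (b : List (List Int)) : List (List Int) :=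
  pvCoalA (pvLoopA a b 0 0 []) 0

-- ===== PORT B =====

-- the `while a and b` loop of Source B, state (a, b, out)
def pvWalkB (a b out : List (List Int)) : List (List Int) :=
  match a, b with
  | pa :: ta, pb :: tb =>
    match pa, pb with
    | [al, ar], [bl, br] =>
      let out' :=
        if ar ≥ bl ∧ br ≥ al then
          out ++ [[max (min al ar) (min bl br), min (max al ar) (max bl br)]]
        else out
      if ar < br then pvWalkB ta (pb :: tb) out'
      else pvWalkB (pa :: ta) tb out'
    | _, _ => out   -- tuple unpacking raises in Python; excluded by Pre_ (unreached there)
  | _, _ => out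
termination_by a.length + b.length
decreasing_by all_goals (simp only [List.length_cons]; omega)

-- the `while out` loop of Source B, state (out, res); out[0][1] etc. via getD (elements are
-- the 2-lists built by the walk, so the indices are in range on reached inputs)
def pvMergeB (out res : List (List Int)) : List (List Int) :=
  match out with
  | x :: y :: rest =>
    if (PySem.List.pyGet? x 1).getD 0 = (PySem.List.pyGet? y 0).getD 0 then
      pvMergeB rest (res ++ [[(PySem.List.pyGet? x 0).getD 0, (PySem.List.pyGet? y 1).getD 0]])
    else
      pvMergeB (y :: rest) (res ++ [x])
  | [x] => res ++ [x]
  | [] => res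

def range_intersect_2list_alt (a : List (List Int)) (b : List (List Int)) : List (List Int) :=
  pvMergeB (pvWalkB a b []) []

-- ===== PRECONDITION & SPEC =====
-- Pre_ requires every element of both lists to be a two-element list (or either list to be
-- empty, in which case nothing is ever unpacked): elsewhere A's tuple unpacking raises
-- ValueError when the walk reaches a malformed element (on inputs whose malformed elements
-- the walk never reaches A still returns — reachability is path-dependent, so those inputs
-- are excluded too; both programs return the same value there).
def Pre_range_intersect_2list (a : List (List Int)) (b : List (List Int)) : Prop :=
  a = [] ∨ b = [] ∨ ((∀ r ∈ a, r.length = 2) ∧ (∀ r ∈ b, r.length = 2))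
instance (a : List (List Int)) (b : List (List Int)) : Decidable (Pre_range_intersect_2list a b) := by
  unfold Pre_range_intersect_2list; infer_instance

def pvWitness_range_intersect_2list : List (List Int) × List (List Int) :=
  ([[0, 5], [3, 9]], [[2, 4], [8, 12]])

def Spec_range_intersect_2list (a : List (List Int)) (b : List (List Int)) (out : List (List Int)) : Prop := out = range_intersect_2list_alt a b
instance (a : List (List Int)) (b : List (List Int)) (out : List (List Int)) : Decidable (Spec_range_intersect_2list a b out) := by unfold Spec_range_intersect_2list; infer_instance

-- ===== CLAIM (what is proved, stated in full; the proofs are below) =====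
def Claim_equal_range_intersect_2list : Prop := ∀ (a : List (List Int)) (b : List (List Int)), Dom_range_intersect_2list a b → Pre_range_intersect_2list a b → Spec_range_intersect_2list a b (range_intersect_2list a b)

-- ===== LEMMAS AND PROOFS =====

-- the middle two of the four sorted endpoints, under the overlap test, are
-- (max of the pair minima, min of the pair maxima)
set_option maxHeartbeats 1600000 in
theorem pvMidA_eq (al ar bl br : Int) (h1 : ar ≥ bl) (h2 : br ≥ al) :
    pvMidA al ar bl br = [max (min al ar) (min bl br), min (max al ar) (max bl br)] := by
  unfold pvMidA
  simp only [PySem.List.sorted_eq_foldl_insertBy, List.foldl]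
  repeat' (simp_all only [PySem.List.insertBy, decide_eq_true_eq]; split_ifs)
  all_goals simp_all [PySem.List.pyGet?, PySem.List.pyIdx?, min_def, max_def]
  all_goals omega

-- cons-style reformulation of the merge pass, used to bridge the two coalescers
def pvMergeC : List (List Int) → List (List Int)
  | x :: y :: rest =>
    if (PySem.List.pyGet? x 1).getD 0 = (PySem.List.pyGet? y 0).getD 0 then
      [(PySem.List.pyGet? x 0).getD 0, (PySem.List.pyGet? y 1).getD 0] :: pvMergeC rest
    else x :: pvMergeC (y :: rest)
  | l => l

theorem pvMergeB_eq_aux : ∀ (n : Nat) (out res : List (List Int)), out.length ≤ n →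
    pvMergeB out res = res ++ pvMergeC out := by
  intro n
  induction n with
  | zero =>
    intro out res hle
    rcases out with _ | _ <;> simp_all [pvMergeB, pvMergeC]
  | succ n ih =>
    intro out res hle
    rcases out with _ | ⟨x, _ | ⟨y, rest⟩⟩
    · simp [pvMergeB, pvMergeC]
    · simp [pvMergeB, pvMergeC]
    · rw [pvMergeB]
      by_cases hm : (PySem.List.pyGet? x 1).getD 0 = (PySem.List.pyGet? y 0).getD 0
      · rw [if_pos hm, ih _ _ (by simp at hle ⊢; omega)]
        simp [pvMergeC, hm]
      · rw [if_neg hm, ih _ _ (by simp at hle ⊢; omega)]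
        simp [pvMergeC, hm]

theorem pvMergeB_eq (out res : List (List Int)) : pvMergeB out res = res ++ pvMergeC out :=
  pvMergeB_eq_aux out.length out res (by omega)

theorem pvMergeC_singleton (x : List Int) : pvMergeC [x] = [x] := by simp [pvMergeC]

theorem pvCoalA_eq_aux : ∀ (n : Nat) (l : List (List Int)) (ri : Nat), l.length - ri ≤ n →
    pvCoalA l ri = l.take ri ++ pvMergeC (l.drop ri) := by
  intro n
  induction n with
  | zero =>
    intro l ri hle
    rw [pvCoalA, dif_neg (by omega)]
    rw [List.drop_eq_nil_of_le (by omega), List.take_of_length_le (by omega)]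
    simp [pvMergeC]
  | succ n ih =>
    intro l ri hle
    by_cases h : (ri : Int) < (l.length : Int) - 1
    · have hri1 : ri + 1 < l.length := by omega
      have hri : ri < l.length := by omega
      have gx : (PySem.List.pyGet? l (ri : Int)).getD ([] : List Int) = l[ri] := by
        rw [PySem.List.pyGet?_natCast, List.getElem?_eq_getElem hri]
        rfl
      have gy : (PySem.List.pyGet? l ((ri : Int) + 1)).getD ([] : List Int) = l[ri + 1] := by
        rw [show ((ri : Int) + 1) = ((ri + 1 : Nat) : Int) from by push_cast; ring]
        rw [PySem.List.pyGet?_natCast, List.getElem?_eq_getElem hri1]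
        rfl
      have hdrop : l.drop ri = l[ri] :: l[ri + 1] :: l.drop (ri + 2) := by
        rw [List.drop_eq_getElem_cons hri, List.drop_eq_getElem_cons hri1]
      rw [pvCoalA, dif_pos h, gx, gy]
      by_cases hm : (PySem.List.pyGet? l[ri] 1).getD 0 = (PySem.List.pyGet? l[ri + 1] 0).getD 0
      · rw [if_pos hm]
        set X : List (List Int) := l.take ri ++
          [[(PySem.List.pyGet? l[ri] 0).getD 0, (PySem.List.pyGet? l[ri + 1] 1).getD 0]] with hXdef
        have hXlen : X.length = ri + 1 := by
          rw [hXdef]; simp; omega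
        rw [ih (X ++ l.drop (ri + 2)) (ri + 1)
          (by simp only [List.length_append, hXlen, List.length_drop]; omega)]
        have ht : (X ++ l.drop (ri + 2)).take (ri + 1) = X := by
          rw [← hXlen]; exact List.take_left
        have hd : (X ++ l.drop (ri + 2)).drop (ri + 1) = l.drop (ri + 2) := by
          rw [← hXlen]; exact List.drop_left
        rw [ht, hd, hdrop, hXdef]
        simp [pvMergeC, hm]
      · rw [if_neg hm]
        have hts : List.take (ri + 1) l = List.take ri l ++ [l[ri]] := by
          rw [List.take_add_one]; simp [List.getElem?_eq_getElem hri]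
        rw [ih _ _ (by omega), hdrop, List.drop_eq_getElem_cons hri1, hts]
        simp only [pvMergeC, if_neg hm]
        rw [List.append_assoc, List.singleton_append]
    · rw [pvCoalA, dif_neg h]
      rcases Nat.lt_or_ge ri l.length with hlt | hge
      · have hlast : l.drop ri = [l[ri]] := by
          rw [List.drop_eq_getElem_cons hlt, List.drop_eq_nil_of_le (by omega)]
        have hts : List.take (ri + 1) l = List.take ri l ++ [l[ri]] := by
          rw [List.take_add_one]; simp [List.getElem?_eq_getElem hlt]
        rw [hlast, pvMergeC_singleton, ← hts,
          List.take_of_length_le (by omega)]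
      · rw [List.drop_eq_nil_of_le hge, List.take_of_length_le hge]
        simp [pvMergeC]

theorem pvCoalA_eq (l : List (List Int)) (ri : Nat) :
    pvCoalA l ri = l.take ri ++ pvMergeC (l.drop ri) :=
  pvCoalA_eq_aux (l.length) l ri (by omega)

theorem pvLoopA_eq_aux : ∀ (n : Nat) (a b : List (List Int)) (i j : Nat) (r : List (List Int)),
    (∀ x ∈ a, x.length = 2) → (∀ x ∈ b, x.length = 2) →
    (a.length - i) + (b.length - j) ≤ n →
    pvLoopA a b i j r = pvWalkB (a.drop i) (b.drop j) r := by
  intro n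
  induction n with
  | zero =>
    intro a b i j r ha hb hle
    rw [pvLoopA, dif_neg (by omega), List.drop_eq_nil_of_le (by omega),
      List.drop_eq_nil_of_le (by omega)]
    simp [pvWalkB]
  | succ n ih =>
    intro a b i j r ha hb hle
    by_cases h : i < a.length ∧ j < b.length
    · obtain ⟨hia, hjb⟩ := h
      obtain ⟨al, ar, hpa⟩ := List.length_eq_two.mp (ha a[i] (List.getElem_mem hia))
      obtain ⟨bl, br, hpb⟩ := List.length_eq_two.mp (hb b[j] (List.getElem_mem hjb))
      have gx : (PySem.List.pyGet? a (i : Int)).getD ([] : List Int) = [al, ar] := by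
        rw [PySem.List.pyGet?_natCast, List.getElem?_eq_getElem hia, Option.getD_some, hpa]
      have gy : (PySem.List.pyGet? b (j : Int)).getD ([] : List Int) = [bl, br] := by
        rw [PySem.List.pyGet?_natCast, List.getElem?_eq_getElem hjb, Option.getD_some, hpb]
      have hda : a.drop i = [al, ar] :: a.drop (i + 1) := by
        rw [List.drop_eq_getElem_cons hia, hpa]
      have hdb : b.drop j = [bl, br] :: b.drop (j + 1) := by
        rw [List.drop_eq_getElem_cons hjb, hpb]
      rw [pvLoopA, dif_pos ⟨hia, hjb⟩]
      simp only [gx, gy]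
      rw [hda, hdb, pvWalkB]
      by_cases hcmp : ar < br
      · simp only [if_pos hcmp]
        rw [ih a b (i + 1) j _ ha hb (by omega), ← hdb]
        by_cases hov : ar ≥ bl ∧ br ≥ al
        · simp only [if_pos hov, pvMidA_eq al ar bl br hov.1 hov.2]
        · simp only [if_neg hov]
      · simp only [if_neg hcmp]
        rw [ih a b i (j + 1) _ ha hb (by omega), ← hda]
        by_cases hov : ar ≥ bl ∧ br ≥ al
        · simp only [if_pos hov, pvMidA_eq al ar bl br hov.1 hov.2]
        · simp only [if_neg hov]
    · rw [pvLoopA, dif_neg h]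
      rcases Nat.lt_or_ge i a.length with hia | hia
      · have hjb : b.length ≤ j := by omega
        rw [List.drop_eq_nil_of_le hjb]
        rcases hx : a.drop i with _ | ⟨p, t⟩ <;> simp [pvWalkB]
      · rw [List.drop_eq_nil_of_le hia]
        simp [pvWalkB]

theorem pvLoopA_eq (a b : List (List Int)) (i j : Nat) (r : List (List Int))
    (ha : ∀ x ∈ a, x.length = 2) (hb : ∀ x ∈ b, x.length = 2) :
    pvLoopA a b i j r = pvWalkB (a.drop i) (b.drop j) r :=
  pvLoopA_eq_aux (a.length + b.length) a b i j r ha hb (by omega)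

-- ===== VERDICT (by name: the statement is the Claim_ definition above) =====
theorem range_intersect_2list_spec : Claim_equal_range_intersect_2list := by
  intro a b _hdom hpre
  unfold Spec_range_intersect_2list range_intersect_2list range_intersect_2list_alt
  rcases hpre with rfl | rfl | ⟨h1, h2⟩
  · rw [pvLoopA, pvCoalA, pvWalkB, pvMergeB]
    simp
    exact fun pa ta pb tb h _ => by simp at h
  · rw [pvLoopA]
    rcases a with _ | ⟨p, t⟩ <;> simp [pvCoalA, pvWalkB, pvMergeB]
  · rw [pvLoopA_eq a b 0 0 [] h1 h2, pvCoalA_eq, pvMergeB_eq]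
    simp
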